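-- pv_equiv track=rewrite | github.com/insaneprasun251/social-media-sentiment-analysis | sentiment_analysis.py | simple_negation_marking
-- ===== SOURCE A (Python) =====
-- NEGATION_WORDS = {
--     "not", "no", "never", "none", "nobody", "nowhere", "neither", "nor",
--     "cannot", "can't", "don't", "doesn't", "didn't", "won't", "isn't",
--     "aren't", "wasn't", "weren't"
-- }
--
-- def simple_negation_marking(text, scope=3):
--     words = text.split()
--     out = []
--     neg = 0
--     for w in words:
--         lw = w.lower()
--         if lw in NEGATION_WORDS:
--             out.append(w)
--             neg = scope
--             continue
--         if neg > 0:
--             out.append('NOT_' + w)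
--             neg -= 1
--         else:
--             out.append(w)
--     return ' '.join(out)
-- ===== SOURCE B (Python) =====
-- NEGATION_WORDS = {
--     "not", "no", "never", "none", "nobody", "nowhere", "neither", "nor",
--     "cannot", "can't", "don't", "doesn't", "didn't", "won't", "isn't",
--     "aren't", "wasn't", "weren't"
-- }
--
-- def simple_negation_marking(text, scope=3):
--     words = text.split()
--     neg_idx = [i for i, w in enumerate(words) if w.lower() in NEGATION_WORDS]
--     pieces = []
--     for i, w in enumerate(words):
--         if w.lower() in NEGATION_WORDS:
--             pieces.append(w)
--         elif any(j < i <= j + scope for j in neg_idx):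
--             pieces.append('NOT_' + w)
--         else:
--             pieces.append(w)
--     return ' '.join(pieces)
-- ===== Notes on version B (the rewrite author's own statement) =====
-- stated objective: alternative
-- what changed: Replaces the resetting countdown state machine with a stateless two-pass decomposition: first collect the indices of negation words, then emit each word independently by checking whether some negation index j satisfies j < i <= j + scope.
import Mathlib
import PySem

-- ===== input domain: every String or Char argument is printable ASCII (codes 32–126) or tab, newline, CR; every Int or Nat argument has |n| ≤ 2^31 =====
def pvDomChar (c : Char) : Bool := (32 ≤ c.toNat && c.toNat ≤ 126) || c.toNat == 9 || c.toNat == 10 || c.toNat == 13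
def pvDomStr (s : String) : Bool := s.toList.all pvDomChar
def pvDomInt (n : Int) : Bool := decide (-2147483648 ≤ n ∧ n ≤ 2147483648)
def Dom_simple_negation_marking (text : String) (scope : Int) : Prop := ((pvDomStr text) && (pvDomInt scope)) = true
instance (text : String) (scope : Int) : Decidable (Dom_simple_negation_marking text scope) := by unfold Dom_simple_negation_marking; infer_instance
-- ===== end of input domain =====

-- B replaces A's resetting countdown state machine with a stateless two-pass
-- positions-then-membership decomposition (alternative, same behaviour).

-- ===== PORT A =====
-- shared module-level constant NEGATION_WORDS (membership-only set)
def pvNEG : List String :=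
  ["not", "no", "never", "none", "nobody", "nowhere", "neither", "nor",
   "cannot", "can't", "don't", "doesn't", "didn't", "won't", "isn't",
   "aren't", "wasn't", "weren't"]

-- A's loop body as a named step function
def pvStepA (scope : Int) (acc : List String × Int) (w : String) : List String × Int :=
  let lw := PySem.Str.lower w
  if lw ∈ pvNEG then (acc.1 ++ [w], scope)
  else if acc.2 > 0 then (acc.1 ++ ["NOT_" ++ w], acc.2 - 1)
  else (acc.1 ++ [w], acc.2)

def simple_negation_marking (text : String) (scope : Int) : String :=
  let words := PySem.Str.split₀ text
  let st := words.foldl (pvStepA scope) ([], 0)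
  PySem.Str.join " " st.1

-- ===== PORT B =====
def simple_negation_marking_alt (text : String) (scope : Int) : String :=
  let words := PySem.Str.split₀ text
  let negIdx := ((PySem.List.enumerate words).filter
      (fun p => PySem.Str.lower p.2 ∈ pvNEG)).map (·.1)
  let pieces := (PySem.List.enumerate words).map (fun p =>
      if PySem.Str.lower p.2 ∈ pvNEG then p.2
      else if negIdx.any (fun j => decide (j < p.1 ∧ p.1 ≤ j + scope)) then "NOT_" ++ p.2
      else p.2)
  PySem.Str.join " " pieces

-- ===== PRECONDITION & SPEC =====
def Spec_simple_negation_marking (text : String) (scope : Int) (out : String) : Prop := out = simple_negation_marking_alt text scope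
instance (text : String) (scope : Int) (out : String) : Decidable (Spec_simple_negation_marking text scope out) := by unfold Spec_simple_negation_marking; infer_instance

-- ===== CLAIM (what is proved, stated in full; the proofs are below) =====
def Claim_equal_simple_negation_marking : Prop := ∀ (text : String) (scope : Int), Dom_simple_negation_marking text scope → Spec_simple_negation_marking text scope (simple_negation_marking text scope)

-- ===== LEMMAS AND PROOFS =====

-- B's per-word rule, for stating the loop invariant
def pvRuleB (scope : Int) (negIdx : List Int) (p : Int × String) : String :=
  if PySem.Str.lower p.2 ∈ pvNEG then p.2
  else if negIdx.any (fun j => decide (j < p.1 ∧ p.1 ≤ j + scope)) then "NOT_" ++ p.2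
  else p.2

-- Loop invariant: A's countdown `neg` satisfies, for all d ≥ 0,
-- d < neg ↔ some negation index j < i0 still covers position i0 + d.
theorem pv_loop (scope : Int) (negIdx : List Int) :
    ∀ (ws : List String) (i0 : Int) (out : List String) (neg : Int),
      (∀ p ∈ PySem.List.enumerate ws i0, (p.1 ∈ negIdx ↔ PySem.Str.lower p.2 ∈ pvNEG)) →
      (∀ d : Int, 0 ≤ d → (d < neg ↔ ∃ j ∈ negIdx, j < i0 ∧ i0 + d ≤ j + scope)) →
      (ws.foldl (pvStepA scope) (out, neg)).1
        = out ++ (PySem.List.enumerate ws i0).map (pvRuleB scope negIdx) := by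
  intro ws
  induction ws with
  | nil => intro i0 out neg _ _; simp [PySem.List.enumerate_nil]
  | cons w ws ih =>
    intro i0 out neg hmem hneg
    have hhead : (i0 ∈ negIdx ↔ PySem.Str.lower w ∈ pvNEG) := by
      have := hmem (i0, w) (by simp [PySem.List.enumerate_cons])
      simpa using this
    have hmem' : ∀ p ∈ PySem.List.enumerate ws (i0 + 1), (p.1 ∈ negIdx ↔ PySem.Str.lower p.2 ∈ pvNEG) := by
      intro p hp
      exact hmem p (by simp [PySem.List.enumerate_cons, hp])
    rw [PySem.List.enumerate_cons]
    by_cases hw : PySem.Str.lower w ∈ pvNEG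
    · -- negation word: neg resets to scope
      have hi0 : i0 ∈ negIdx := hhead.mpr hw
      have hneg' : ∀ d : Int, 0 ≤ d → (d < scope ↔ ∃ j ∈ negIdx, j < i0 + 1 ∧ (i0 + 1) + d ≤ j + scope) := by
        intro d hd
        constructor
        · intro h; exact ⟨i0, hi0, by omega, by omega⟩
        · rintro ⟨j, _, hlt, hle⟩; omega
      have := ih (i0 + 1) (out ++ [w]) scope hmem' hneg'
      simp only [List.foldl_cons, pvStepA, hw, if_pos, pvRuleB, List.map_cons]
      simp [this]
    · -- ordinary word
      have hi0 : i0 ∉ negIdx := fun h => hw (hhead.mp h)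
      by_cases hpos : neg > 0
      · -- marked
        have hcov : ∃ j ∈ negIdx, j < i0 ∧ i0 ≤ j + scope := by
          have := (hneg 0 le_rfl).mp (by omega)
          simpa using this
        have hneg' : ∀ d : Int, 0 ≤ d → (d < neg - 1 ↔ ∃ j ∈ negIdx, j < i0 + 1 ∧ (i0 + 1) + d ≤ j + scope) := by
          intro d hd
          have h1 := hneg (d + 1) (by omega)
          constructor
          · intro h
            rcases h1.mp (by omega) with ⟨j, hj, hlt, hle⟩
            exact ⟨j, hj, by omega, by omega⟩
          · rintro ⟨j, hj, hlt, hle⟩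
            have hji : j ≠ i0 := fun he => hi0 (he ▸ hj)
            have : d + 1 < neg := h1.mpr ⟨j, hj, by omega, by omega⟩
            omega
        have := ih (i0 + 1) (out ++ ["NOT_" ++ w]) (neg - 1) hmem' hneg'
        simp only [List.foldl_cons, pvStepA, hw, if_neg, not_false_iff, hpos, if_pos]
        simp only [this, pvRuleB, List.map_cons]
        simp [hw]
        exact hcov
      · -- unmarked, neg stays
        have hneg' : ∀ d : Int, 0 ≤ d → (d < neg ↔ ∃ j ∈ negIdx, j < i0 + 1 ∧ (i0 + 1) + d ≤ j + scope) := by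
          intro d hd
          constructor
          · intro h; omega
          · rintro ⟨j, hj, hlt, hle⟩
            have hji : j ≠ i0 := fun he => hi0 (he ▸ hj)
            have := (hneg (d + 1) (by omega)).mpr ⟨j, hj, by omega, by omega⟩
            omega
        have := ih (i0 + 1) (out ++ [w]) neg hmem' hneg'
        simp only [List.foldl_cons, pvStepA, hw, if_neg, not_false_iff, hpos, if_neg]
        simp only [this, pvRuleB, List.map_cons]
        simp [hw]
        intro x hx h1 h2
        exfalso
        have : (0 : Int) < neg := (hneg 0 le_rfl).mpr ⟨x, hx, h1, by omega⟩
        omega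

-- the filtered index list classifies positions correctly
theorem pv_negIdx_mem (words : List String)
    (p : Int × String) (hp : p ∈ PySem.List.enumerate words 0) :
    (p.1 ∈ ((PySem.List.enumerate words).filter (fun q => PySem.Str.lower q.2 ∈ pvNEG)).map (·.1)
      ↔ PySem.Str.lower p.2 ∈ pvNEG) := by
  constructor
  · intro h
    rcases List.mem_map.mp h with ⟨q, hq, hq1⟩
    have hqmem := List.mem_filter.mp hq
    have hqprop : PySem.Str.lower q.2 ∈ pvNEG := by
      have := hqmem.2; simpa using this
    rcases (PySem.List.mem_enumerate_iff _ _ _).mp hp with ⟨k, hk, hpk⟩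
    rcases (PySem.List.mem_enumerate_iff _ _ _).mp hqmem.1 with ⟨k', hk', hqk⟩
    have : k = k' := by
      have h1 : p.1 = (0 : Int) + k := by rw [hpk]
      have h2 : q.1 = (0 : Int) + k' := by rw [hqk]
      omega
    have hpq : p = q := by subst this; rw [hpk, hqk]
    rw [hpq]; exact hqprop
  · intro h
    exact List.mem_map.mpr ⟨p, List.mem_filter.mpr ⟨hp, by simpa using h⟩, rfl⟩

-- elements of the filtered index list are nonnegative
theorem pv_negIdx_nonneg (words : List String)
    (j : Int) (hj : j ∈ ((PySem.List.enumerate words).filter (fun q => PySem.Str.lower q.2 ∈ pvNEG)).map (·.1)) :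
    0 ≤ j := by
  rcases List.mem_map.mp hj with ⟨q, hq, hq1⟩
  rcases (PySem.List.mem_enumerate_iff _ _ _).mp (List.mem_filter.mp hq).1 with ⟨k, hk, hqk⟩
  have : q.1 = (0 : Int) + k := by rw [hqk]
  omega

-- ===== VERDICT (by name: the statement is the Claim_ definition above) =====
theorem simple_negation_marking_spec : Claim_equal_simple_negation_marking := by
  intro text scope _
  unfold Spec_simple_negation_marking
  have hmem : ∀ p ∈ PySem.List.enumerate (PySem.Str.split₀ text) 0,
      (p.1 ∈ ((PySem.List.enumerate (PySem.Str.split₀ text)).filter (fun q => PySem.Str.lower q.2 ∈ pvNEG)).map (·.1)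
        ↔ PySem.Str.lower p.2 ∈ pvNEG) :=
    fun p hp => pv_negIdx_mem (PySem.Str.split₀ text) p hp
  have hneg0 : ∀ d : Int, 0 ≤ d → (d < (0 : Int) ↔ ∃ j ∈ ((PySem.List.enumerate (PySem.Str.split₀ text)).filter (fun q => PySem.Str.lower q.2 ∈ pvNEG)).map (·.1), j < 0 ∧ 0 + d ≤ j + scope) := by
    intro d hd
    constructor
    · intro h; omega
    · rintro ⟨j, hj, hlt, _⟩
      have := pv_negIdx_nonneg (PySem.Str.split₀ text) j hj
      omega
  have hloop := pv_loop scope _ (PySem.Str.split₀ text) 0 [] 0 hmem hneg0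
  simp only [List.nil_append] at hloop
  show PySem.Str.join " " ((PySem.Str.split₀ text).foldl (pvStepA scope) ([], 0)).1 = _
  rw [hloop]
  rfl
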